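-- pv_equiv track=rewrite | github.com/anhbkpro/leetcode | python/binary_search/minimum_number_of_days_to_make_m_bouquets.py | get_num_of_bouquets
-- ===== SOURCE A (Python) =====
-- from typing import List
--
-- def get_num_of_bouquets(bloomDay: List[int], mid: int, k: int) -> int:
--     bouquets = 0
--     flowers = 0
--     for day in bloomDay:
--         if day <= mid:
--             flowers += 1
--             if flowers == k:
--                 bouquets += 1
--                 flowers = 0
--         else:
--             flowers = 0
--     return bouquets
-- ===== SOURCE B (Python) =====
-- def get_num_of_bouquets(bloomDay, mid, k):
--     if k <= 0:
--         return 0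
--     mask = ''.join('x' if day <= mid else ' ' for day in bloomDay)
--     return sum(len(seg) // k for seg in mask.split())
-- ===== Notes on version B (the rewrite author's own statement) =====
-- stated objective: alternative
-- what changed: B renders the list into a string mask ('x' for bloomed, space otherwise), splits it on whitespace into maximal bloomed segments, and sums len(seg)//k over the segments (guarding k<=0 -> 0), replacing A's single-pass increment-and-reset counter by staged map/join/split/sum passes.
import Mathlib
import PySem

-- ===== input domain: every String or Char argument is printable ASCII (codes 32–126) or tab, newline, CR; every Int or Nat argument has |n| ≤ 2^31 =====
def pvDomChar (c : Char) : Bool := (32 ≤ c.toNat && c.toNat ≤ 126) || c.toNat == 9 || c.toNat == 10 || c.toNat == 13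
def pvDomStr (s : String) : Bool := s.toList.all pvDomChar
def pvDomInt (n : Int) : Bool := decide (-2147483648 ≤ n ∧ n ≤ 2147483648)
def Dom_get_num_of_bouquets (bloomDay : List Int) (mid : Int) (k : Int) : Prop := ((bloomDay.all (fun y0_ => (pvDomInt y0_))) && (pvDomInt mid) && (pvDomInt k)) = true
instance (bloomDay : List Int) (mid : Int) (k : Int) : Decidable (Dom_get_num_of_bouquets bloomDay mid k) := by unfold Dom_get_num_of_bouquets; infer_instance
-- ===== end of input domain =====

-- B renders bloomDay into a string mask, splits it on whitespace into maximal bloomed segments and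
-- sums len(seg) // k (with a k ≤ 0 guard returning 0), replacing A's increment-and-reset counter
-- by staged map/join/split/sum passes; alternative decomposition, same O(n) cost.


-- ===== PORT A =====
-- one loop step of A: flowers counter incremented, reset when it reaches k or the day is not bloomed
def pvStepA (mid k : Int) (st : Int × Int) (day : Int) : Int × Int :=
  if day ≤ mid then
    let f := st.2 + 1
    if f = k then (st.1 + 1, 0) else (st.1, f)
  else (st.1, 0)

def get_num_of_bouquets (bloomDay : List Int) (mid : Int) (k : Int) : Int :=
  (bloomDay.foldl (pvStepA mid k) (0, 0)).1

-- ===== PORT B =====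
def get_num_of_bouquets_alt (bloomDay : List Int) (mid : Int) (k : Int) : Int :=
  if k ≤ 0 then 0
  else
    let mask : String := String.ofList (bloomDay.map (fun day => if day ≤ mid then 'x' else ' '))
    ((PySem.Str.split₀ mask).map (fun seg => PySem.Int.floordiv (PySem.Str.len seg) k)).sum

-- ===== PRECONDITION & SPEC =====
def Spec_get_num_of_bouquets (bloomDay : List Int) (mid : Int) (k : Int) (out : Int) : Prop := out = get_num_of_bouquets_alt bloomDay mid k
instance (bloomDay : List Int) (mid : Int) (k : Int) (out : Int) : Decidable (Spec_get_num_of_bouquets bloomDay mid k out) := by unfold Spec_get_num_of_bouquets; infer_instance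

-- ===== CLAIM (what is proved, stated in full; the proofs are below) =====
def Claim_equal_get_num_of_bouquets : Prop := ∀ (bloomDay : List Int) (mid : Int) (k : Int), Dom_get_num_of_bouquets bloomDay mid k → Spec_get_num_of_bouquets bloomDay mid k (get_num_of_bouquets bloomDay mid k)

-- ===== LEMMAS AND PROOFS =====

-- sum of len // k over a list of segments (k > 0, so // is ediv)
def segSum (k : Int) (ss : List (List Char)) : Int :=
  (ss.map (fun s => (s.length : Int) / k)).sum

-- with k ≤ 0 the counter f (kept ≥ 0) can never equal k after an increment, so A's bouquet count stays put
theorem foldA_nonpos (mid k : Int) (hk : k ≤ 0) :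
    ∀ (l : List Int) (b f : Int), 0 ≤ f →
      (l.foldl (pvStepA mid k) (b, f)).1 = b := by
  intro l
  induction l with
  | nil => intro b f _; simp [List.foldl]
  | cons d tl ih =>
    intro b f hf
    simp only [List.foldl, pvStepA]
    split_ifs with h1 h2
    · omega
    · exact ih b (f + 1) (by omega)
    · exact ih b 0 le_rfl

-- the boolean mask a day contributes
def maskOf (mid : Int) (day : Int) : Char := if day ≤ mid then 'x' else ' '

-- A's loop from state (b + |cur|/k + segSum acc, |cur| % k) lands where split₀.go's segments sum to;
-- cur is the (reversed) current run of split₀.go, acc its finished segments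
theorem foldA_go (mid k : Int) (hk : 0 < k) :
    ∀ (l : List Int) (cur : List Char) (acc : List (List Char)) (b : Int),
      (l.foldl (pvStepA mid k)
          (b + (cur.length : Int) / k + segSum k acc, (cur.length : Int) % k)).1
        = b + segSum k (PySem.Chars.split₀.go (l.map (maskOf mid)) cur acc) := by
  intro l
  induction l with
  | nil =>
    intro cur acc b
    cases cur with
    | nil => simp [PySem.Chars.split₀.go, segSum]
    | cons c cs =>
      simp [PySem.Chars.split₀.go, segSum]
      ring
  | cons d tl ih =>
    intro cur acc b
    by_cases hd : d ≤ mid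
    · -- bloomed: mask char 'x', not whitespace; A may complete a bouquet
      have hmask : maskOf mid d = 'x' := by simp [maskOf, hd]
      have hm0 : (0 : Int) ≤ (cur.length : Int) := by positivity
      have hmod0 : 0 ≤ (cur.length : Int) % k := Int.emod_nonneg _ (by omega)
      have hmodlt : (cur.length : Int) % k < k := Int.emod_lt_of_pos _ hk
      simp only [List.map, hmask, List.foldl, pvStepA]
      have hgo : PySem.Chars.split₀.go ('x' :: tl.map (maskOf mid)) cur acc
          = PySem.Chars.split₀.go (tl.map (maskOf mid)) ('x' :: cur) acc := by
        simp [PySem.Chars.split₀.go, PySem.Chars.isspace]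
      rw [hgo]
      by_cases hfull : (cur.length : Int) % k + 1 = k
      · have hq : ((cur.length : Int) + 1) / k = (cur.length : Int) / k + 1 ∧
                  ((cur.length : Int) + 1) % k = 0 := by
          have := (Int.ediv_emod_unique (a := (cur.length : Int) + 1) (b := k)
            (r := 0) (q := (cur.length : Int) / k + 1) hk).mpr
            (by constructor
                · nlinarith [Int.emod_add_ediv_mul (cur.length : Int) k]
                · omega)
          exact ⟨this.1, this.2⟩
        have h := ih ('x' :: cur) acc b
        simp only [List.length_cons] at h
        have hc : ((cur.length + 1 : ℕ) : Int) = (cur.length : Int) + 1 := by push_cast; ring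
        rw [hc, hq.1, hq.2] at h
        simp only [if_pos hd, if_pos hfull]
        have e : b + ((cur.length : Int) / k + 1) + segSum k acc
            = b + (cur.length : Int) / k + segSum k acc + 1 := by ring
        rw [e] at h
        exact h
      · have hq : ((cur.length : Int) + 1) / k = (cur.length : Int) / k ∧
                  ((cur.length : Int) + 1) % k = (cur.length : Int) % k + 1 := by
          have := (Int.ediv_emod_unique (a := (cur.length : Int) + 1) (b := k)
            (r := (cur.length : Int) % k + 1) (q := (cur.length : Int) / k) hk).mpr
            (by constructor
                · nlinarith [Int.emod_add_ediv_mul (cur.length : Int) k]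
                · omega)
          exact ⟨this.1, this.2⟩
        have h := ih ('x' :: cur) acc b
        simp only [List.length_cons] at h
        have hc : ((cur.length + 1 : ℕ) : Int) = (cur.length : Int) + 1 := by push_cast; ring
        rw [hc, hq.1, hq.2] at h
        simp only [if_pos hd, if_neg hfull]
        exact h
    · -- not bloomed: mask char ' ', whitespace; both reset, B's go banks the finished segment
      have hmask : maskOf mid d = ' ' := by simp [maskOf, hd]
      simp only [List.map, hmask, List.foldl, pvStepA, if_neg hd]
      cases cur with
      | nil =>
        have hgo : PySem.Chars.split₀.go (' ' :: tl.map (maskOf mid)) [] acc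
            = PySem.Chars.split₀.go (tl.map (maskOf mid)) [] acc := by
          simp [PySem.Chars.split₀.go, PySem.Chars.isspace]
        rw [hgo]
        have h := ih [] acc b
        simpa using h
      | cons c cs =>
        have hgo : PySem.Chars.split₀.go (' ' :: tl.map (maskOf mid)) (c :: cs) acc
            = PySem.Chars.split₀.go (tl.map (maskOf mid)) [] (((c :: cs).reverse) :: acc) := by
          simp [PySem.Chars.split₀.go, PySem.Chars.isspace]
        rw [hgo]
        have h := ih [] (((c :: cs).reverse) :: acc) b
        simp only [List.length_nil, Nat.cast_zero, Int.zero_ediv, Int.zero_emod, segSum,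
          List.map_cons, List.sum_cons, List.length_reverse] at h ⊢
        have e : b + 0 + (((c :: cs).length : Int) / k + (acc.map (fun s => (s.length : Int) / k)).sum)
            = b + ((c :: cs).length : Int) / k + (acc.map (fun s => (s.length : Int) / k)).sum := by ring
        rw [e] at h
        exact h

-- ===== VERDICT (by name: the statement is the Claim_ definition above) =====
theorem get_num_of_bouquets_spec : Claim_equal_get_num_of_bouquets := by
  intro bloomDay mid k _
  unfold Spec_get_num_of_bouquets get_num_of_bouquets get_num_of_bouquets_alt
  by_cases hk : k ≤ 0
  · simp only [if_pos hk]
    exact foldA_nonpos mid k hk bloomDay 0 0 le_rfl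
  · have hk' : 0 < k := by omega
    simp only [if_neg hk]
    have h := foldA_go mid k hk' bloomDay [] [] 0
    simp only [List.length_nil, Nat.cast_zero, Int.zero_ediv, Int.zero_emod, segSum,
      List.map_nil, List.sum_nil, add_zero, zero_add] at h
    rw [h]
    unfold maskOf
    simp [PySem.Str.split₀, PySem.Chars.split₀, PySem.Str.len,
      PySem.Int.floordiv_eq_ediv_of_pos hk', Function.comp_def]
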